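-- pv_equiv track=rewrite | github.com/fukuoka-shota/nlp100-knock-practice | chapter_4/34.py | bunsetsu_texts
-- ===== SOURCE A (Python) =====
-- def bunsetsu_texts(sent_lines):
--     texts, cur = [], []
--     for line in sent_lines:
--         if line.startswith("* "):
--             if cur:
--                 texts.append("".join(cur))
--                 cur = []
--         elif line.startswith("+ "):
--             continue
--         else:
--             surface = line.split()[0]
--             cur.append(surface)
--     if cur:
--         texts.append("".join(cur))
--     return texts
-- ===== SOURCE B (Python) =====
-- def bunsetsu_texts(sent_lines):
--     # Pass 1: partition the lines into segments, opening a new segment at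
--     # every "* " delimiter line (lines before the first delimiter form the
--     # first segment).
--     segments, seg = [], []
--     for line in sent_lines:
--         if line.startswith("* "):
--             segments.append(seg)
--             seg = []
--         else:
--             seg.append(line)
--     segments.append(seg)
--     # Pass 2: render each segment as the concatenation of the surface
--     # tokens of its non-"+ " lines; keep only non-empty renderings.
--     out = []
--     for seg in segments:
--         tokens = [l.split()[0] for l in seg if not l.startswith("+ ")]
--         if tokens:
--             out.append("".join(tokens))
--     return out
-- ===== Notes on version B (the rewrite author's own statement) =====
-- stated objective: alternative
-- what changed: Replaced A's single forward pass with a flush-on-delimiter accumulator by a two-pass decomposition: first partition the lines into segments at the '* ' delimiter lines, then render each segment independently (surface tokens of its non-'+ ' lines, kept only if non-empty).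
import Mathlib
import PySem

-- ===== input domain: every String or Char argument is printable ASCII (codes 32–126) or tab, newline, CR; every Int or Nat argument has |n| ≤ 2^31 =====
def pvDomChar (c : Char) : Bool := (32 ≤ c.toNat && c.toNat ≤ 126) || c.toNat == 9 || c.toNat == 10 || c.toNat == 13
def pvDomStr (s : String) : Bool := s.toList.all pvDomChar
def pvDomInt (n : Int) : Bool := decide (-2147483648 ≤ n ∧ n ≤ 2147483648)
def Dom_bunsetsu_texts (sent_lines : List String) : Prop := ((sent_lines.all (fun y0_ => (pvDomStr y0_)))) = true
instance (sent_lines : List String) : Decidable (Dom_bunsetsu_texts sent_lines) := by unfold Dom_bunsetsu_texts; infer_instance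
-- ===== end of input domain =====

-- B replaces A's single pass with its flush-on-delimiter accumulator by a two-pass
-- decomposition: partition the lines into segments at the "* " delimiters, then
-- render each segment independently (objective: alternative, same cost).

-- ===== PORT A =====
-- A's loop: state (texts, cur); flushed by the final 'if cur' (the '.headD ""' arm of
-- line.split()[0] is unreachable under Pre_, where split() is nonempty on surface lines).
def stepA (st : List String × List String) (line : String) : List String × List String :=
  if PySem.Str.startswith line "* " then
    if st.2 ≠ [] then (st.1 ++ [PySem.Str.join "" st.2], []) else st
  else if PySem.Str.startswith line "+ " then st
  else (st.1, st.2 ++ [(PySem.Str.split₀ line).headD ""])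

def bunsetsu_texts (sent_lines : List String) : List String :=
  let st := sent_lines.foldl stepA ([], [])
  if st.2 ≠ [] then st.1 ++ [PySem.Str.join "" st.2] else st.1

-- ===== PORT B =====
-- Source B pass 1: the forward loop with segments.append(seg)/seg.append(line), then
-- segments.append(seg).  Pass 2: tokens of each segment, kept if non-empty.
def stepB (st : List (List String) × List String) (line : String) : List (List String) × List String :=
  if PySem.Str.startswith line "* " then (st.1 ++ [st.2], [])
  else (st.1, st.2 ++ [line])

def tokB (l : String) : String := (PySem.Str.split₀ l).headD ""

def chunkB (seg : List String) : List String :=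
  (seg.filter (fun l => !PySem.Str.startswith l "+ ")).map tokB

def bunsetsu_texts_alt (sent_lines : List String) : List String :=
  let p := sent_lines.foldl stepB ([], [])
  (p.1 ++ [p.2]).foldl (fun out seg =>
    let tokens := chunkB seg
    if tokens ≠ [] then out ++ [PySem.Str.join "" tokens] else out) []

-- ===== PRECONDITION & SPEC =====
-- Pre_ excludes exactly the inputs where Python A raises IndexError: a line that is
-- neither a "* " nor a "+ " line and whose split() is empty (whitespace-only line).
def Pre_bunsetsu_texts (sent_lines : List String) : Prop :=
  ∀ l ∈ sent_lines, PySem.Str.startswith l "* " = true ∨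
    PySem.Str.startswith l "+ " = true ∨ PySem.Str.split₀ l ≠ []
instance (sent_lines : List String) : Decidable (Pre_bunsetsu_texts sent_lines) := by
  unfold Pre_bunsetsu_texts; infer_instance
def pvWitness_bunsetsu_texts : List String := ["* 0 1D", "word\tnoun", "+ 1", "* 1 -1D", "foo bar"]

def Spec_bunsetsu_texts (sent_lines : List String) (out : List String) : Prop := out = bunsetsu_texts_alt sent_lines
instance (sent_lines : List String) (out : List String) : Decidable (Spec_bunsetsu_texts sent_lines out) := by unfold Spec_bunsetsu_texts; infer_instance

-- ===== CLAIM =====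
def Claim_equal_bunsetsu_texts : Prop := ∀ (sent_lines : List String), Dom_bunsetsu_texts sent_lines → Pre_bunsetsu_texts sent_lines → Spec_bunsetsu_texts sent_lines (bunsetsu_texts sent_lines)

-- ===== LEMMAS AND PROOFS =====

-- one rendered segment (nothing if it has no tokens)
def emitB (ts : List String) : List String :=
  if ts ≠ [] then [PySem.Str.join "" ts] else []

theorem chunkB_nil : chunkB [] = [] := by simp [chunkB]

theorem chunkB_append_plus (s : List String) (l : String)
    (h2 : PySem.Chars.startswith l.toList "+ ".toList = true) :
    chunkB (s ++ [l]) = chunkB s := by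
  have h2c : PySem.Chars.startswith l.toList ['+', ' '] = true := by simpa using h2
  simp [chunkB, h2c]

theorem chunkB_append_surface (s : List String) (l : String)
    (h2 : PySem.Chars.startswith l.toList "+ ".toList = false) :
    chunkB (s ++ [l]) = chunkB s ++ [tokB l] := by
  have h2c : PySem.Chars.startswith l.toList ['+', ' '] = false := by simpa using h2
  simp [chunkB, h2c]

-- B's second pass is a flatMap of emitB ∘ chunkB
theorem foldl_emit (segs : List (List String)) (acc : List String) :
    segs.foldl (fun out seg =>
      if chunkB seg ≠ [] then out ++ [PySem.Str.join "" (chunkB seg)] else out) acc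
    = acc ++ segs.flatMap (fun seg => emitB (chunkB seg)) := by
  induction segs generalizing acc with
  | nil => simp
  | cons s ss ih =>
    simp only [List.foldl_cons, ih, List.flatMap_cons, emitB]
    split_ifs <;> simp

-- the main invariant: A's fold, from any state, against B's forward segmentation
theorem main_inv (lines : List String) (segs : List (List String)) (seg : List String)
    (T : List String) :
    (if (lines.foldl stepA (T ++ segs.flatMap (fun s => emitB (chunkB s)), chunkB seg)).2 ≠ [] then
        (lines.foldl stepA (T ++ segs.flatMap (fun s => emitB (chunkB s)), chunkB seg)).1
          ++ [PySem.Str.join "" (lines.foldl stepA (T ++ segs.flatMap (fun s => emitB (chunkB s)), chunkB seg)).2]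
      else (lines.foldl stepA (T ++ segs.flatMap (fun s => emitB (chunkB s)), chunkB seg)).1)
    = T ++ ((lines.foldl stepB (segs, seg)).1 ++ [(lines.foldl stepB (segs, seg)).2]).flatMap
        (fun s => emitB (chunkB s)) := by
  induction lines generalizing segs seg with
  | nil =>
    simp only [List.foldl_nil, List.flatMap_append, List.flatMap_cons, List.flatMap_nil, emitB]
    split_ifs <;> simp_all
  | cons l ls ih =>
    simp only [List.foldl_cons]
    by_cases h1 : PySem.Chars.startswith l.toList "* ".toList = true
    · have hstep : stepA (T ++ segs.flatMap (fun s => emitB (chunkB s)), chunkB seg) l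
          = (T ++ (segs ++ [seg]).flatMap (fun s => emitB (chunkB s)), chunkB []) := by
        simp only [stepA, PySem.Str.startswith]
        rw [h1]
        simp only [if_true, List.flatMap_append, List.flatMap_cons, List.flatMap_nil,
          chunkB_nil, emitB]
        split_ifs with hc <;> simp_all
      have hg : stepB (segs, seg) l = (segs ++ [seg], []) := by
        simp only [stepB, PySem.Str.startswith]
        rw [h1]
        simp
      rw [hstep, hg, ih]
    · have h1' : PySem.Chars.startswith l.toList "* ".toList = false := by
        revert h1; cases PySem.Chars.startswith l.toList "* ".toList <;> simp
      have hg : stepB (segs, seg) l = (segs, seg ++ [l]) := by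
        simp only [stepB, PySem.Str.startswith]
        rw [h1']
        simp
      by_cases h2 : PySem.Chars.startswith l.toList "+ ".toList = true
      · have hstep : stepA (T ++ segs.flatMap (fun s => emitB (chunkB s)), chunkB seg) l
            = (T ++ segs.flatMap (fun s => emitB (chunkB s)), chunkB (seg ++ [l])) := by
          simp only [stepA, PySem.Str.startswith]
          rw [h1', h2]
          simp [chunkB_append_plus _ _ h2]
        rw [hstep, hg, ih]
      · have h2' : PySem.Chars.startswith l.toList "+ ".toList = false := by
          revert h2; cases PySem.Chars.startswith l.toList "+ ".toList <;> simp
        have hstep : stepA (T ++ segs.flatMap (fun s => emitB (chunkB s)), chunkB seg) l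
            = (T ++ segs.flatMap (fun s => emitB (chunkB s)), chunkB (seg ++ [l])) := by
          simp only [stepA, PySem.Str.startswith]
          rw [h1', h2']
          simp [chunkB_append_surface _ _ h2', tokB]
        rw [hstep, hg, ih]

-- ===== VERDICT =====
theorem bunsetsu_texts_spec : Claim_equal_bunsetsu_texts := by
  intro sent_lines _ _
  unfold Spec_bunsetsu_texts bunsetsu_texts bunsetsu_texts_alt
  rw [foldl_emit]
  have := main_inv sent_lines [] [] []
  simpa [chunkB_nil] using this
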